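-- pv_equiv track=rewrite | github.com/zhkflame/StudyCode | leetcode/squareGo.py | findSquare2
-- ===== SOURCE A (Python) =====
-- def findSquare2(go):
--     lenG=go
--     matrix=[0 for i in range(lenG)]
--     sum=0
--     for i in range(1,lenG):
--         for j in range(1,lenG):
--             if i==j:
--                 matrix[j]=matrix[j-1]+1
--             else:
--                 matrix[j]=max(matrix[j-1],matrix[j])
--             sum+=matrix[j]
--     return sum
-- ===== SOURCE B (Python) =====
-- def findSquare2(go):
--     # closed form: A's double loop sums min(i,j) over 1<=i,j<go, which equals
--     # the sum of squares 1^2+...+(go-1)^2 = (go-1)*go*(2*go-1)//6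
--     if go <= 1:
--         return 0
--     return (go - 1) * go * (2 * go - 1) // 6
-- ===== Notes on version B (the rewrite author's own statement) =====
-- stated objective: faster
-- what changed: replaces the O(n^2) in-place DP matrix double loop by the closed form (n-1)n(2n-1)/6 (sum of squares), with 0 for n<=1
import Mathlib
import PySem

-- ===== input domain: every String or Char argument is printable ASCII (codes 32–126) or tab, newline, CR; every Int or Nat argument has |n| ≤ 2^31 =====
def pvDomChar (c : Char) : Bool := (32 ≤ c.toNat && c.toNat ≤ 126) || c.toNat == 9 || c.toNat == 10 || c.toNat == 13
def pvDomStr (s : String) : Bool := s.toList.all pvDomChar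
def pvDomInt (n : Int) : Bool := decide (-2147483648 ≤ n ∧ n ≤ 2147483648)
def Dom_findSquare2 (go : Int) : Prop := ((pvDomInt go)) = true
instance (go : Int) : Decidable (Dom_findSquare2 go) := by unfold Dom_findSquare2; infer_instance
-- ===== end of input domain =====

-- B replaces A's O(n^2) in-place DP double loop by the closed form (n-1)n(2n-1)/6.

-- ===== PORT A =====
-- indices j-1 and j always lie in [0, lenG), so pyGetD/pySetD are exact here
def findSquare2 (go : Int) : Int :=
  let lenG := go
  let matrix := (PySem.List.pyRange 0 lenG 1).map (fun _ => (0 : Int))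
  let st := (PySem.List.pyRange 1 lenG 1).foldl (fun st i =>
    (PySem.List.pyRange 1 lenG 1).foldl (fun st j =>
      let m := st.1
      let v := if i = j then PySem.List.pyGetD m (j - 1) 0 + 1
               else max (PySem.List.pyGetD m (j - 1) 0) (PySem.List.pyGetD m j 0)
      (PySem.List.pySetD m j v, st.2 + v)) st) (matrix, (0 : Int))
  st.2

-- ===== PORT B =====
def findSquare2_alt (go : Int) : Int :=
  if go ≤ 1 then 0
  else PySem.Int.floordiv ((go - 1) * go * (2 * go - 1)) 6

-- ===== PRECONDITION & SPEC =====
def Spec_findSquare2 (go : Int) (out : Int) : Prop := out = findSquare2_alt go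
instance (go : Int) (out : Int) : Decidable (Spec_findSquare2 go out) := by unfold Spec_findSquare2; infer_instance

-- ===== CLAIM (what is proved, stated in full; the proofs are below) =====
def Claim_equal_findSquare2 : Prop := ∀ (go : Int), Dom_findSquare2 go → Spec_findSquare2 go (findSquare2 go)

-- ===== LEMMAS AND PROOFS =====

-- matrix contents after rows 1..t of A's outer loop: matrix[j] = min t j
def pvRow (t n : Nat) : List Int := (List.range n).map (fun j => ((min t j : Nat) : Int))

-- matrix contents mid-row t, after inner iterations j = 1..a-1
def pvMix (t a n : Nat) : List Int :=
  (List.range n).map (fun j => (((if j < a then min t j else min (t - 1) j) : Nat) : Int))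

theorem pvMix_start (t n : Nat) (ht : 1 ≤ t) : pvMix t 1 n = pvRow (t - 1) n := by
  unfold pvMix pvRow
  apply List.map_congr_left
  intro j _
  congr 1
  rcases Nat.lt_or_ge j 1 with h | h
  · interval_cases j <;> simp
  · simp [Nat.not_lt.mpr h]

theorem pvMix_end (t n : Nat) : pvMix t n n = pvRow t n := by
  unfold pvMix pvRow
  apply List.map_congr_left
  intro j hj
  rw [List.mem_range] at hj
  simp [hj]

theorem pvMix_getD (t a n k : Nat) (hk : k < n) :
    (pvMix t a n).getD k 0 = (((if k < a then min t k else min (t - 1) k) : Nat) : Int) := by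
  unfold pvMix
  rw [List.getD_eq_getElem _ _ (by simpa using hk)]
  simp

theorem pvMix_set (t a n : Nat) (ha : a < n) :
    (pvMix t a n).set a ((min t a : Nat) : Int) = pvMix t (a + 1) n := by
  apply List.ext_getElem
  · simp [pvMix]
  · intro k h1 h2
    simp only [pvMix, List.getElem_set, List.getElem_map, List.getElem_range]
    simp only [pvMix, List.length_set, List.length_map, List.length_range] at h1
    rcases eq_or_ne a k with hka | hka
    · subst hka
      simp
    · rw [if_neg hka]
      congr 1
      have hka' : k ≠ a := fun h => hka h.symm
      split_ifs <;> omega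

-- the inner loop body of port A
def pvStep (i : Int) (st : List Int × Int) (j : Int) : List Int × Int :=
  let m := st.1
  let v := if i = j then PySem.List.pyGetD m (j - 1) 0 + 1
           else max (PySem.List.pyGetD m (j - 1) 0) (PySem.List.pyGetD m j 0)
  (PySem.List.pySetD m j v, st.2 + v)

theorem pvInner (t n : Nat) (ht : 1 ≤ t) (htn : t < n) :
    ∀ (a : Nat) (s : Int), 1 ≤ a → a ≤ n →
    (PySem.List.pyRange (a : Int) (n : Int) 1).foldl (pvStep (t : Int)) (pvMix t a n, s)
      = (pvRow t n, s + ((∑ j ∈ Finset.Ico a n, min t j : Nat) : Int)) := by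
  intro a s ha han
  induction hn : n - a generalizing a s with
  | zero =>
      have : a = n := by omega
      subst this
      rw [PySem.List.pyRange_one_eq_nil (by omega)]
      simp [pvMix_end]
  | succ k ih =>
      have haltn : a < n := by omega
      rw [PySem.List.pyRange_one_cons (by exact_mod_cast haltn)]
      simp only [List.foldl_cons]
      have hstep : pvStep (t : Int) (pvMix t a n, s) (a : Int)
          = (pvMix t (a + 1) n, s + ((min t a : Nat) : Int)) := by
        unfold pvStep
        have hgm1 : PySem.List.pyGetD (pvMix t a n) ((a : Int) - 1) 0
            = ((min t (a - 1) : Nat) : Int) := by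
          have : ((a : Int) - 1) = ((a - 1 : Nat) : Int) := by omega
          rw [this, PySem.List.pyGetD_natCast, pvMix_getD t a n (a - 1) (by omega)]
          simp [Nat.lt_of_lt_of_le (by omega : a - 1 < a) (le_refl a), show a - 1 < a by omega]
        have hgm2 : PySem.List.pyGetD (pvMix t a n) (a : Int) 0
            = ((min (t - 1) a : Nat) : Int) := by
          rw [PySem.List.pyGetD_natCast, pvMix_getD t a n a (by omega)]
          simp
        have hv : (if (t : Int) = (a : Int) then PySem.List.pyGetD (pvMix t a n) ((a : Int) - 1) 0 + 1
             else max (PySem.List.pyGetD (pvMix t a n) ((a : Int) - 1) 0)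
                      (PySem.List.pyGetD (pvMix t a n) (a : Int) 0))
            = ((min t a : Nat) : Int) := by
          rw [hgm1, hgm2]
          by_cases hta : t = a
          · subst hta
            simp only [if_pos rfl]
            push_cast
            omega
          · rw [if_neg (by exact_mod_cast hta)]
            rw [← Nat.cast_max]
            congr 1
            omega
        simp only [hv]
        rw [PySem.List.pySetD_natCast, pvMix_set t a n haltn]
      rw [hstep]
      have hcast : ((a : Int) + 1) = ((a + 1 : Nat) : Int) := by push_cast; ring
      rw [hcast, ih (a + 1) _ (by omega) (by omega) (by omega)]
      simp only [Prod.mk.injEq, true_and]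
      rw [Finset.sum_eq_sum_Ico_succ_bot haltn]
      push_cast
      ring

-- A's total: the double sum of min over Ico 1 n × Ico 1 n
theorem pvOuter (n : Nat) :
    ∀ (t : Nat) (s : Int), 1 ≤ t → t ≤ n →
    (PySem.List.pyRange (t : Int) (n : Int) 1).foldl
        (fun st i => (PySem.List.pyRange 1 (n : Int) 1).foldl (pvStep i) st)
        (pvRow (t - 1) n, s)
      = (pvRow (n - 1) n,
         s + ((∑ i ∈ Finset.Ico t n, ∑ j ∈ Finset.Ico 1 n, min i j : Nat) : Int)) := by
  intro t s ht htn
  induction hn : n - t generalizing t s with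
  | zero =>
      have : t = n := by omega
      subst this
      rw [show PySem.List.pyRange (t : Int) (t : Int) 1 = [] from
        PySem.List.pyRange_one_eq_nil (by omega)]
      simp
  | succ k ih =>
      have htltn : t < n := by omega
      rw [show PySem.List.pyRange (t : Int) (n : Int) 1
            = (t : Int) :: PySem.List.pyRange ((t : Int) + 1) (n : Int) 1 from
        PySem.List.pyRange_one_cons (by exact_mod_cast htltn)]
      simp only [List.foldl_cons]
      have h1 : (PySem.List.pyRange 1 (n : Int) 1).foldl (pvStep (t : Int)) (pvRow (t - 1) n, s)
          = (pvRow t n, s + ((∑ j ∈ Finset.Ico 1 n, min t j : Nat) : Int)) := by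
        have := pvInner t n ht htltn 1 s (le_refl 1) (by omega)
        rw [pvMix_start t n ht] at this
        simpa using this
      rw [h1]
      have h2 := ih (t + 1) (s + ((∑ j ∈ Finset.Ico 1 n, min t j : Nat) : Int))
        (by omega) (by omega) (by omega)
      simp only [Nat.add_sub_cancel] at h2
      have hcast : ((t : Int) + 1) = ((t + 1 : Nat) : Int) := by push_cast; ring
      rw [hcast, h2]
      simp only [Prod.mk.injEq, true_and]
      rw [Finset.sum_eq_sum_Ico_succ_bot htltn (fun i => ∑ j ∈ Finset.Ico 1 n, min i j)]
      push_cast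
      ring

-- the double sum of min equals six times less than (n-1)n(2n-1)
theorem pvSumMin (m : Nat) :
    6 * (∑ t ∈ Finset.range m, ∑ j ∈ Finset.range m, min (t + 1) (j + 1)) =
      m * (m + 1) * (2 * m + 1) := by
  induction m with
  | zero => simp
  | succ m ih =>
      have hG : (∑ t ∈ Finset.range m, (t + 1)) * 2 = m * (m + 1) := by
        have := Finset.sum_range_id_mul_two (m + 1)
        rw [Finset.sum_range_succ'] at this
        simpa [Nat.add_mul, Nat.mul_comm] using this
      have hrow : ∀ t ∈ Finset.range m, min (t + 1) (m + 1) = t + 1 := by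
        intro t htm; simp only [Finset.mem_range] at htm; omega
      have hin : ∀ t ∈ Finset.range m,
          (∑ j ∈ Finset.range (m + 1), min (t + 1) (j + 1))
            = (∑ j ∈ Finset.range m, min (t + 1) (j + 1)) + (t + 1) := by
        intro t htm
        rw [Finset.sum_range_succ]
        congr 1
        exact hrow t htm
      rw [Finset.sum_range_succ, Finset.sum_congr rfl hin, Finset.sum_add_distrib]
      have hlast : (∑ j ∈ Finset.range (m + 1), min (m + 1) (j + 1))
          = (∑ j ∈ Finset.range m, (j + 1)) + (m + 1) := by
        rw [Finset.sum_range_succ]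
        congr 1
        · apply Finset.sum_congr rfl
          intro j hj; simp only [Finset.mem_range] at hj; omega
        · simp
      rw [hlast]
      nlinarith [ih, hG]

theorem pvIcoSum (n : Nat) (hn : 1 ≤ n) :
    (∑ i ∈ Finset.Ico 1 n, ∑ j ∈ Finset.Ico 1 n, min i j)
      = ∑ t ∈ Finset.range (n - 1), ∑ j ∈ Finset.range (n - 1), min (t + 1) (j + 1) := by
  rw [Finset.sum_Ico_eq_sum_range]
  apply Finset.sum_congr rfl
  intro t _
  rw [Finset.sum_Ico_eq_sum_range]
  apply Finset.sum_congr rfl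
  intro j _
  simp [Nat.add_comm]

-- defeq reformulation of port A's body via the named step function
theorem findSquare2_eq (go : Int) :
    findSquare2 go =
      ((PySem.List.pyRange 1 go 1).foldl
        (fun st i => (PySem.List.pyRange 1 go 1).foldl (pvStep i) st)
        ((PySem.List.pyRange 0 go 1).map (fun _ => (0 : Int)), (0 : Int))).2 := rfl

-- ===== VERDICT (by name: the statement is the Claim_ definition above) =====
theorem findSquare2_spec : Claim_equal_findSquare2 := by
  intro go _
  unfold Spec_findSquare2 findSquare2_alt
  rw [findSquare2_eq]
  by_cases hle : go ≤ 1
  · rw [if_pos hle,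
      show PySem.List.pyRange 1 go 1 = [] from PySem.List.pyRange_one_eq_nil (by omega)]
    simp
  · rw [if_neg hle]
    push_neg at hle
    obtain ⟨m, rfl⟩ : ∃ m : Nat, go = ((m + 2 : Nat) : Int) := ⟨(go - 2).toNat, by omega⟩
    have hmat : (PySem.List.pyRange 0 ((m + 2 : Nat) : Int) 1).map (fun _ => (0 : Int))
        = pvRow (1 - 1) (m + 2) := by
      rw [PySem.List.pyRange_one]
      simp [pvRow, show ((m : Int) + 2).toNat = m + 2 by omega, ← List.map_map, List.map_const']
    rw [hmat]
    have hout := pvOuter (m + 2) 1 0 (by omega) (by omega)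
    simp only [Nat.cast_one] at hout
    rw [hout]
    simp only [zero_add]
    rw [pvIcoSum (m + 2) (by omega)]
    have hT := pvSumMin (m + 2 - 1)
    simp only [show m + 2 - 1 = m + 1 from rfl] at hT ⊢
    have hform : (((m + 2 : Nat) : Int) - 1) * ((m + 2 : Nat) : Int) * (2 * ((m + 2 : Nat) : Int) - 1)
        = 6 * ((∑ t ∈ Finset.range (m + 1), ∑ j ∈ Finset.range (m + 1), min (t + 1) (j + 1) : Nat) : Int) := by
      have hc := congrArg (fun x : Nat => (x : Int)) hT
      push_cast at hc ⊢
      nlinarith [hc]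
    rw [hform, PySem.Int.floordiv_eq_ediv_of_pos (by norm_num)]
    omega
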